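-- pv_equiv track=rewrite | github.com/codefromkarl/ai-orchestration | src/taskplane/git_committer.py | _infer_commit_scope
-- ===== SOURCE A (Python) =====
-- def _infer_commit_scope(changed_paths: list[str]) -> str:
--     normalized_paths = [path.strip() for path in changed_paths if path.strip()]
--     if not normalized_paths:
--         return "core"
--     if all(path.startswith("docs/") for path in normalized_paths):
--         return "docs"
--     if all(path.startswith("tests/") for path in normalized_paths):
--         return "test"
--     if any(path.startswith("src/stardrifter_engine/world") for path in normalized_paths):
--         return "world"
--     if any(path.startswith("src/stardrifter_engine/economy") for path in normalized_paths):
--         return "economy"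
--     if any(path.startswith("src/stardrifter_engine/agent") for path in normalized_paths):
--         return "agent"
--     if any(path.startswith("godot/ui/") for path in normalized_paths):
--         return "ui"
--     if any(path.startswith("requirements") or path.endswith("poetry.lock") for path in normalized_paths):
--         return "deps"
--     return "core"
-- ===== SOURCE B (Python) =====
-- def _infer_commit_scope(changed_paths: list[str]) -> str:
--     # Single pass: maintain all_*/any_* flags instead of seven separate list scans.
--     empty = True
--     all_docs = all_tests = True
--     any_world = any_economy = any_agent = any_ui = any_deps = False
--     for path in changed_paths:
--         p = path.strip()
--         if not p:
--             continue
--         empty = False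
--         all_docs = all_docs and p.startswith("docs/")
--         all_tests = all_tests and p.startswith("tests/")
--         any_world = any_world or p.startswith("src/stardrifter_engine/world")
--         any_economy = any_economy or p.startswith("src/stardrifter_engine/economy")
--         any_agent = any_agent or p.startswith("src/stardrifter_engine/agent")
--         any_ui = any_ui or p.startswith("godot/ui/")
--         any_deps = any_deps or p.startswith("requirements") or p.endswith("poetry.lock")
--     if empty:
--         return "core"
--     if all_docs:
--         return "docs"
--     if all_tests:
--         return "test"
--     if any_world:
--         return "world"
--     if any_economy:
--         return "economy"
--     if any_agent:
--         return "agent"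
--     if any_ui:
--         return "ui"
--     if any_deps:
--         return "deps"
--     return "core"
-- ===== Notes on version B (the rewrite author's own statement) =====
-- stated objective: alternative
-- what changed: Replaces A's seven separate scans of the normalized path list (build list, then all/all/any/any/any/any/any) with a single traversal that maintains emptiness, all_docs/all_tests and the five any_* flags, followed by the same priority cascade on the flags.
import Mathlib
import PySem

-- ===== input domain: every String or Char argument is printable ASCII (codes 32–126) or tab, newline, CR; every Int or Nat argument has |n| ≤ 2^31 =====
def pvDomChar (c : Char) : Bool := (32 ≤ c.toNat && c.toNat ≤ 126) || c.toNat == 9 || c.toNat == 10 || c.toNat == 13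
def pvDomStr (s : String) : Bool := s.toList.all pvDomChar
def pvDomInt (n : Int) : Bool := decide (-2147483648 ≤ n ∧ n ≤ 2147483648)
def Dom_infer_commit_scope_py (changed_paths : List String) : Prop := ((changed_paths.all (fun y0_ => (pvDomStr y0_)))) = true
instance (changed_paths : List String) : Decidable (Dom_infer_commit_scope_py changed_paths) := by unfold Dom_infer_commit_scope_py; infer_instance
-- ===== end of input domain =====

-- B replaces A's seven scans of the normalized list with one flag-maintaining pass; same result (alternative decomposition).

-- ===== PORT A =====
def infer_commit_scope_py (changed_paths : List String) : String :=
  let normalized_paths :=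
    (changed_paths.map PySem.Str.strip).filter (fun p => p ≠ "")
  if normalized_paths = [] then "core"
  else if normalized_paths.all (fun p => PySem.Str.startswith p "docs/") then "docs"
  else if normalized_paths.all (fun p => PySem.Str.startswith p "tests/") then "test"
  else if normalized_paths.any (fun p => PySem.Str.startswith p "src/stardrifter_engine/world") then "world"
  else if normalized_paths.any (fun p => PySem.Str.startswith p "src/stardrifter_engine/economy") then "economy"
  else if normalized_paths.any (fun p => PySem.Str.startswith p "src/stardrifter_engine/agent") then "agent"
  else if normalized_paths.any (fun p => PySem.Str.startswith p "godot/ui/") then "ui"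
  else if normalized_paths.any (fun p => PySem.Str.startswith p "requirements" || PySem.Str.endswith p "poetry.lock") then "deps"
  else "core"

-- ===== PORT B =====
-- state: (empty, all_docs, all_tests, any_world, any_economy, any_agent, any_ui, any_deps)
def pvBState := Bool × Bool × Bool × Bool × Bool × Bool × Bool × Bool

def pvBStep (st : pvBState) (path : String) : pvBState :=
  let p := PySem.Str.strip path
  if p = "" then st
  else
    (false,
     st.2.1 && PySem.Str.startswith p "docs/",
     st.2.2.1 && PySem.Str.startswith p "tests/",
     st.2.2.2.1 || PySem.Str.startswith p "src/stardrifter_engine/world",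
     st.2.2.2.2.1 || PySem.Str.startswith p "src/stardrifter_engine/economy",
     st.2.2.2.2.2.1 || PySem.Str.startswith p "src/stardrifter_engine/agent",
     st.2.2.2.2.2.2.1 || PySem.Str.startswith p "godot/ui/",
     st.2.2.2.2.2.2.2 || PySem.Str.startswith p "requirements" || PySem.Str.endswith p "poetry.lock")

def infer_commit_scope_py_alt (changed_paths : List String) : String :=
  let st := changed_paths.foldl pvBStep (true, true, true, false, false, false, false, false)
  if st.1 then "core"
  else if st.2.1 then "docs"
  else if st.2.2.1 then "test"
  else if st.2.2.2.1 then "world"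
  else if st.2.2.2.2.1 then "economy"
  else if st.2.2.2.2.2.1 then "agent"
  else if st.2.2.2.2.2.2.1 then "ui"
  else if st.2.2.2.2.2.2.2 then "deps"
  else "core"

-- ===== PRECONDITION & SPEC =====
def Spec_infer_commit_scope_py (changed_paths : List String) (out : String) : Prop := out = infer_commit_scope_py_alt changed_paths
instance (changed_paths : List String) (out : String) : Decidable (Spec_infer_commit_scope_py changed_paths out) := by unfold Spec_infer_commit_scope_py; infer_instance

-- ===== CLAIM (what is proved, stated in full; the proofs are below) =====
def Claim_equal_infer_commit_scope_py : Prop := ∀ (changed_paths : List String), Dom_infer_commit_scope_py changed_paths → Spec_infer_commit_scope_py changed_paths (infer_commit_scope_py changed_paths)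

-- ===== LEMMAS AND PROOFS =====

-- the single pass computes exactly the seven aggregate facts about the normalized list
lemma pvBFold_spec (xs : List String) (e d t w ec ag u dp : Bool) :
    xs.foldl pvBStep (e, d, t, w, ec, ag, u, dp) =
      (let N := (xs.map PySem.Str.strip).filter (fun p => p ≠ "")
       (e && N.isEmpty,
        d && N.all (fun p => PySem.Str.startswith p "docs/"),
        t && N.all (fun p => PySem.Str.startswith p "tests/"),
        w || N.any (fun p => PySem.Str.startswith p "src/stardrifter_engine/world"),
        ec || N.any (fun p => PySem.Str.startswith p "src/stardrifter_engine/economy"),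
        ag || N.any (fun p => PySem.Str.startswith p "src/stardrifter_engine/agent"),
        u || N.any (fun p => PySem.Str.startswith p "godot/ui/"),
        dp || N.any (fun p => PySem.Str.startswith p "requirements" || PySem.Str.endswith p "poetry.lock"))) := by
  induction xs generalizing e d t w ec ag u dp with
  | nil => simp
  | cons x xs ih =>
    by_cases hx : PySem.Str.strip x = ""
    · simp [pvBStep, hx, ih]
    · simp [pvBStep, hx, ih, Bool.and_assoc, Bool.or_assoc]

-- ===== VERDICT (by name: the statement is the Claim_ definition above) =====
theorem infer_commit_scope_py_spec : Claim_equal_infer_commit_scope_py := by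
  intro xs _
  unfold Spec_infer_commit_scope_py infer_commit_scope_py infer_commit_scope_py_alt
  rw [pvBFold_spec]
  simp only [Bool.true_and, Bool.false_or]
  by_cases h : (xs.map PySem.Str.strip).filter (fun p => p ≠ "") = [] <;>
    simp [List.isEmpty_iff]
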